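-- pv_equiv track=rewrite | github.com/beliveau-lab/lightsheet-analysis-pipeline | scripts/choose_lmax.py | _get_coeff_mapping
-- ===== SOURCE A (Python) =====
-- def _get_coeff_mapping(lmax):
--     """Create mapping from coefficient names to column indices."""
--     col_map, col_idx = {}, 0
--     for L in range(lmax + 1):
--         for M in range(L + 1):
--             if M == 0:
--                 col_map[f"shcoeffs_L{L}M{M}C"] = col_idx
--                 col_idx += 1
--             else:
--                 col_map[f"shcoeffs_L{L}M{M}C"] = col_idx
--                 col_map[f"shcoeffs_L{L}M{M}S"] = col_idx + 1
--                 col_idx += 2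
--     return col_map
-- ===== SOURCE B (Python) =====
-- def _get_coeff_mapping(lmax):
--     """Create mapping from coefficient names to column indices."""
--     return {
--         f"shcoeffs_L{L}M{M}{part}": L * L + (2 * M - (part == "C") if M else 0)
--         for L in range(lmax + 1)
--         for M in range(L + 1)
--         for part in (("C",) if M == 0 else ("C", "S"))
--     }
-- ===== Notes on version B (the rewrite author's own statement) =====
-- stated objective: simpler
-- what changed: B replaces A's running col_idx accumulator with a single dict comprehension computing each column index in closed form (block base L*L plus 0 / 2M-1 / 2M), so every entry is independent of iteration state.
import Mathlib
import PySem

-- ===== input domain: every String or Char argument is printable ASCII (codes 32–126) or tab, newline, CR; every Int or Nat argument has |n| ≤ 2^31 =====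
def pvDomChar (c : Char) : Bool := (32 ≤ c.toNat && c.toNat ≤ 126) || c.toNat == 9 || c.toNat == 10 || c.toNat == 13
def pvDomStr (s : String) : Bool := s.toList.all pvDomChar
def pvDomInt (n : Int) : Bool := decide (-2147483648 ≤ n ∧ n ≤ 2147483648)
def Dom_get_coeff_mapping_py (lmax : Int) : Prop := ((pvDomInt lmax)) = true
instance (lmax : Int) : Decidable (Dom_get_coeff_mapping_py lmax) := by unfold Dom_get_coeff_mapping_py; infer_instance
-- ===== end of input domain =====

-- B replaces A's running col_idx counter with a dict comprehension assigning each
-- coefficient name its column index in closed form (base L*L, offset 0 / 2M-1 / 2M).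


-- f-string f"shcoeffs_L{L}M{M}{part}" (exact: str(L)/str(M) are PySem.Int.toChars,
-- concatenation of the literal chunks is list append); shared by both ports since
-- both Pythons build the very same key string.
def pyName (L M : Int) (part : String) : String :=
  String.ofList ("shcoeffs_L".toList ++ PySem.Int.toChars L ++ 'M' :: (PySem.Int.toChars M ++ part.toList))

-- ===== PORT A =====
-- inner loop body of A: one step of 'for M in range(L+1)' over state (col_map, col_idx)
def aInnerStep (L : Int) (st : PySem.Dict String Int × Int) (M : Int) : PySem.Dict String Int × Int :=
  if M == 0 then
    (st.1.insert (pyName L M "C") st.2, st.2 + 1)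
  else
    ((st.1.insert (pyName L M "C") st.2).insert (pyName L M "S") (st.2 + 1), st.2 + 2)

-- outer loop body of A: 'for M in range(L+1): …'
def aOuterStep (st : PySem.Dict String Int × Int) (L : Int) : PySem.Dict String Int × Int :=
  (PySem.List.pyRange 0 (L + 1) 1).foldl (aInnerStep L) st

def get_coeff_mapping_py (lmax : Int) : List (String × Int) :=
  ((PySem.List.pyRange 0 (lmax + 1) 1).foldl aOuterStep ((PySem.Dict.empty : PySem.Dict String Int), 0)).1.items

-- ===== PORT B =====
-- one comprehension entry: name ↦ L*L + (2*M - (part == "C") if M else 0)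
def bEntry (L M : Int) (part : String) : String × Int :=
  (pyName L M part, L * L + (if M == 0 then 0 else 2 * M - (if part == "C" then 1 else 0)))

def get_coeff_mapping_py_alt (lmax : Int) : List (String × Int) :=
  (PySem.List.pyRange 0 (lmax + 1) 1).flatMap fun L =>
    (PySem.List.pyRange 0 (L + 1) 1).flatMap fun M =>
      (if M == 0 then ["C"] else ["C", "S"]).map (bEntry L M)

-- ===== PRECONDITION & SPEC =====
def Spec_get_coeff_mapping_py (lmax : Int) (out : List (String × Int)) : Prop := out = get_coeff_mapping_py_alt lmax
instance (lmax : Int) (out : List (String × Int)) : Decidable (Spec_get_coeff_mapping_py lmax out) := by unfold Spec_get_coeff_mapping_py; infer_instance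

-- ===== CLAIM (what is proved, stated in full; the proofs are below) =====
def Claim_equal_get_coeff_mapping_py : Prop := ∀ (lmax : Int), Dom_get_coeff_mapping_py lmax → Spec_get_coeff_mapping_py lmax (get_coeff_mapping_py lmax)

-- ===== LEMMAS AND PROOFS =====

-- decimal value of a digit-char list, the left inverse of Nat.toDigits 10
def decNat (cs : List Char) : Nat := cs.foldl (fun a c => 10 * a + (c.toNat - 48)) 0

theorem decNat_append_singleton (xs : List Char) (c : Char) :
    decNat (xs ++ [c]) = 10 * decNat xs + (c.toNat - 48) := by
  simp [decNat]

theorem decNat_toDigits (n : Nat) : decNat (Nat.toDigits 10 n) = n := by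
  induction n using Nat.strong_induction_on with
  | _ n ih =>
    rw [Nat.toDigits_eq_if (by norm_num)]
    split
    · next hlt => interval_cases n <;> decide
    · next hge =>
      rw [decNat_append_singleton, ih (n / 10) (by omega)]
      have h10 : n % 10 < 10 := Nat.mod_lt _ (by norm_num)
      have : (n % 10).digitChar.toNat - 48 = n % 10 := by
        interval_cases h : n % 10 <;> decide
      omega

theorem toDigits10_inj {m n : Nat} (h : Nat.toDigits 10 m = Nat.toDigits 10 n) : m = n := by
  have := congrArg decNat h
  simpa [decNat_toDigits] using this

theorem toChars_nonneg (n : Int) (hn : 0 ≤ n) :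
    PySem.Int.toChars n = Nat.toDigits 10 n.toNat := by
  simp [PySem.Int.toChars, not_lt.mpr hn]

theorem toChars_inj {m n : Int} (hm : 0 ≤ m) (hn : 0 ≤ n)
    (h : PySem.Int.toChars m = PySem.Int.toChars n) : m = n := by
  rw [toChars_nonneg m hm, toChars_nonneg n hn] at h
  have := toDigits10_inj h
  omega

theorem M_not_mem_toChars (n : Int) (hn : 0 ≤ n) : 'M' ∉ PySem.Int.toChars n := by
  rw [toChars_nonneg n hn]
  intro hmem
  have := Nat.isDigit_of_mem_toDigits (by norm_num) (by norm_num) hmem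
  simp [Char.isDigit] at this

-- unique split of a char list at its first 'M'
theorem splitM : ∀ (a a' b b' : List Char), 'M' ∉ a → 'M' ∉ a' →
    a ++ 'M' :: b = a' ++ 'M' :: b' → a = a' ∧ b = b' := by
  intro a
  induction a with
  | nil =>
    intro a' b b' _ ha' h
    cases a' with
    | nil => simpa using h
    | cons x xs =>
      simp at h
      exact absurd (h.1 ▸ List.mem_cons_self) ha'
  | cons x xs ih =>
    intro a' b b' ha ha' h
    cases a' with
    | nil =>
      simp at h
      exact absurd (h.1 ▸ List.mem_cons_self) ha
    | cons y ys =>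
      simp at h ha ha'
      obtain ⟨hxy, hrest⟩ := h
      obtain ⟨h1, h2⟩ := ih ys b b' ha.2 ha'.2 hrest
      exact ⟨by simp [hxy, h1], h2⟩

theorem pyName_inj {L M L' M' : Int} {p p' : String}
    (hL : 0 ≤ L) (hL' : 0 ≤ L') (hM : 0 ≤ M) (hM' : 0 ≤ M')
    (hp : p = "C" ∨ p = "S") (hp' : p' = "C" ∨ p' = "S")
    (h : pyName L M p = pyName L' M' p') : L = L' ∧ M = M' ∧ p = p' := by
  have hl := congrArg String.toList h
  simp only [pyName, String.toList_ofList] at hl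
  rw [List.append_assoc, List.append_assoc] at hl
  have hl2 := List.append_cancel_left hl
  obtain ⟨hLs, hrest⟩ :=
    splitM _ _ _ _ (M_not_mem_toChars L hL) (M_not_mem_toChars L' hL') hl2
  refine ⟨toChars_inj hL hL' hLs, ?_⟩
  rcases hp with hp | hp <;> rcases hp' with hp' | hp' <;>
    subst hp <;> subst hp' <;>
    simp only [String.toList] at hrest <;>
    obtain ⟨hMs, hc⟩ := List.append_singleton_inj.mp hrest <;>
    first
      | exact ⟨toChars_inj hM hM' hMs, rfl⟩
      | exact absurd hc (by decide)

-- B's list as a function of the (exclusive) outer bound, and its per-L prefix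
def blockPrefix (L m : Int) : List (String × Int) :=
  (PySem.List.pyRange 0 m 1).flatMap fun M =>
    (if M == 0 then ["C"] else ["C", "S"]).map (bEntry L M)

def bList (n : Int) : List (String × Int) :=
  (PySem.List.pyRange 0 n 1).flatMap fun L => blockPrefix L (L + 1)

theorem alt_eq_bList (lmax : Int) : get_coeff_mapping_py_alt lmax = bList (lmax + 1) := rfl

theorem mem_blockPrefix {L m : Int} {k : String} {v : Int} (h : (k, v) ∈ blockPrefix L m) :
    ∃ M p, 0 ≤ M ∧ M < m ∧ (p = "C" ∨ p = "S") ∧ k = pyName L M p := by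
  simp only [blockPrefix, List.mem_flatMap, PySem.List.mem_pyRange_one, List.mem_map] at h
  obtain ⟨M, ⟨hM0, hMm⟩, p, hp, hk⟩ := h
  refine ⟨M, p, hM0, hMm, ?_, ?_⟩
  · rcases Decidable.em (M = 0) with h0 | h0 <;> simp [h0] at hp <;> tauto
  · have := congrArg Prod.fst hk
    simpa [bEntry] using this.symm

theorem mem_bList {n : Int} {k : String} {v : Int} (h : (k, v) ∈ bList n) :
    ∃ L M p, 0 ≤ L ∧ L < n ∧ 0 ≤ M ∧ (p = "C" ∨ p = "S") ∧ k = pyName L M p := by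
  simp only [bList, List.mem_flatMap, PySem.List.mem_pyRange_one] at h
  obtain ⟨L, ⟨hL0, hLn⟩, hmem⟩ := h
  obtain ⟨M, p, hM0, _, hp, hk⟩ := mem_blockPrefix hmem
  exact ⟨L, M, p, hL0, hLn, hM0, hp, hk⟩

-- the inner loop of A, collapsed: after processing M = 0 .. m-1 the dict has the
-- blockPrefix appended and col_idx = L*L + 2*m - 1
theorem inner_eq (L : Int) (hL : 0 ≤ L) (d : PySem.Dict String Int)
    (hfresh : ∀ M p, 0 ≤ M → (p = "C" ∨ p = "S") → d.contains (pyName L M p) = false) :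
    ∀ m, 1 ≤ m → m ≤ L + 1 →
      (PySem.List.pyRange 0 m 1).foldl (aInnerStep L) (d, L * L) =
        (PySem.Dict.mk (d.items ++ blockPrefix L m), L * L + 2 * m - 1) := by
  have hd : PySem.Dict.mk d.items = d := PySem.Dict.ext_iff.mpr rfl
  intro m hm1
  induction m, hm1 using Int.le_induction with
  | base =>
    intro _
    have h01 : (0 : Int) < 1 := by norm_num
    rw [PySem.List.pyRange_one_cons h01, PySem.List.pyRange_one_eq_nil (by norm_num)]
    have hc : d.contains (pyName L 0 "C") = false := hfresh 0 "C" le_rfl (Or.inl rfl)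
    simp only [List.foldl_cons, List.foldl_nil, aInnerStep, beq_self_eq_true, if_pos]
    refine Prod.ext ?_ (by omega)
    refine PySem.Dict.ext_iff.mpr ?_
    rw [PySem.Dict.items_insert_of_not_contains d _ hc]
    simp only [blockPrefix]
    rw [PySem.List.pyRange_one_cons h01, PySem.List.pyRange_one_eq_nil (by norm_num)]
    simp [bEntry]
  | succ m hm ih =>
    intro hle
    have ihr := ih (by omega)
    rw [PySem.List.pyRange_one_succ_right (by omega), List.foldl_append, ihr]
    simp only [List.foldl_cons, List.foldl_nil, aInnerStep]
    have hmne : (m == (0 : Int)) = false := by simp; omega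
    rw [hmne]
    simp only [Bool.false_eq_true, if_false]
    -- freshness of the two new keys in the accumulated dict
    have hkey : ∀ (p : String), p = "C" ∨ p = "S" →
        ∀ pr ∈ d.items ++ blockPrefix L m, (pr.1 == pyName L m p) = false := by
      intro p hp pr hpr
      rcases List.mem_append.mp hpr with hpr | hpr
      · by_contra hne
        have heq : pr.1 = pyName L m p := by
          have := Bool.not_eq_false _ |>.mp hne
          exact beq_iff_eq.mp this
        have hcont : d.contains (pyName L m p) = true := by
          rw [← hd, PySem.Dict.contains_mk]
          exact List.any_eq_true.mpr ⟨pr, hpr, beq_iff_eq.mpr heq⟩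
        rw [hfresh m p (by omega) hp] at hcont
        exact Bool.false_ne_true hcont
      · obtain ⟨M', p', hM'0, hM'm, hp', hk⟩ := mem_blockPrefix (k := pr.1) (v := pr.2) (by simpa using hpr)
        by_contra hne
        have heq : pr.1 = pyName L m p := beq_iff_eq.mp (Bool.not_eq_false _ |>.mp hne)
        have := pyName_inj hL hL hM'0 (by omega) hp' hp (hk ▸ heq)
        omega
    have hcC : (PySem.Dict.mk (d.items ++ blockPrefix L m)).contains (pyName L m "C") = false := by
      rw [PySem.Dict.contains_mk]
      exact List.any_eq_false.mpr (fun pr hpr => by simp [hkey "C" (Or.inl rfl) pr hpr])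
    have hitemsC := PySem.Dict.items_insert_of_not_contains
      (PySem.Dict.mk (d.items ++ blockPrefix L m)) (k := pyName L m "C") (L * L + 2 * m - 1) hcC
    have hCS : pyName L m "C" ≠ pyName L m "S" := by
      intro hcs
      have := pyName_inj hL hL (by omega : (0:Int) ≤ m) (by omega : (0:Int) ≤ m)
        (Or.inl rfl) (Or.inr rfl) hcs
      simpa using this.2.2
    have hcS : ((PySem.Dict.mk (d.items ++ blockPrefix L m)).insert (pyName L m "C")
        (L * L + 2 * m - 1)).contains (pyName L m "S") = false := by
      have : ((PySem.Dict.mk (d.items ++ blockPrefix L m)).insert (pyName L m "C")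
          (L * L + 2 * m - 1)) = PySem.Dict.mk ((d.items ++ blockPrefix L m) ++
            [(pyName L m "C", L * L + 2 * m - 1)]) := by
        refine PySem.Dict.ext_iff.mpr ?_
        simpa using hitemsC
      rw [this, PySem.Dict.contains_mk]
      refine List.any_eq_false.mpr ?_
      intro pr hpr
      rcases List.mem_append.mp hpr with hpr | hpr
      · simp [hkey "S" (Or.inr rfl) pr hpr]
      · simp at hpr
        subst hpr
        simp
        exact hCS
    have hitemsS := PySem.Dict.items_insert_of_not_contains
      (((PySem.Dict.mk (d.items ++ blockPrefix L m)).insert (pyName L m "C")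
        (L * L + 2 * m - 1))) (k := pyName L m "S") (L * L + 2 * m - 1 + 1) hcS
    refine Prod.ext ?_ (by simp only []; omega)
    refine PySem.Dict.ext_iff.mpr ?_
    simp only []
    rw [hitemsS, hitemsC]
    -- blockPrefix L (m+1) = blockPrefix L m ++ the two new entries
    have hbp : blockPrefix L (m + 1) = blockPrefix L m ++
        [(pyName L m "C", L * L + 2 * m - 1), (pyName L m "S", L * L + 2 * m - 1 + 1)] := by
      simp only [blockPrefix]
      rw [PySem.List.pyRange_one_succ_right (by omega), List.flatMap_append]
      have h1 : L * L + 2 * m - 1 = L * L + (2 * m - 1) := by ring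
      have h2 : L * L + 2 * m - 1 + 1 = L * L + 2 * m := by ring
      rw [h2, h1]
      simp [bEntry, show ¬ m = 0 by omega]
    rw [hbp]
    simp only [List.append_assoc, List.cons_append, List.nil_append]

theorem outer_eq : ∀ n : Int, 0 ≤ n →
    (PySem.List.pyRange 0 n 1).foldl aOuterStep ((PySem.Dict.empty : PySem.Dict String Int), 0) =
      (PySem.Dict.mk (bList n), n * n) := by
  intro n hn
  induction n, hn using Int.le_induction with
  | base =>
    rw [PySem.List.pyRange_one_eq_nil le_rfl]
    simp only [List.foldl_nil, bList]
    rw [PySem.List.pyRange_one_eq_nil le_rfl]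
    simp [PySem.Dict.empty]
  | succ n hn ih =>
    rw [PySem.List.pyRange_one_succ_right hn, List.foldl_append, ih]
    simp only [List.foldl_cons, List.foldl_nil, aOuterStep]
    have hfresh : ∀ M p, 0 ≤ M → (p = "C" ∨ p = "S") →
        (PySem.Dict.mk (bList n)).contains (pyName n M p) = false := by
      intro M p hM hp
      rw [PySem.Dict.contains_mk]
      refine List.any_eq_false.mpr ?_
      intro pr hpr
      obtain ⟨L', M', p', hL'0, hL'n, hM'0, hp', hk⟩ :=
        mem_bList (k := pr.1) (v := pr.2) (by simpa using hpr)
      intro hbe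
      have heq : pr.1 = pyName n M p := beq_iff_eq.mp hbe
      have := pyName_inj hL'0 hn hM'0 hM hp' hp (hk ▸ heq)
      omega
    have hres := inner_eq n hn (PySem.Dict.mk (bList n)) hfresh (n + 1) (by omega) (by omega)
    rw [hres]
    have hbl : bList (n + 1) = bList n ++ blockPrefix n (n + 1) := by
      simp only [bList]
      rw [PySem.List.pyRange_one_succ_right hn, List.flatMap_append, List.flatMap_cons,
        List.flatMap_nil, List.append_nil]
    rw [hbl]
    refine Prod.ext rfl ?_
    simp only []
    ring

-- ===== VERDICT (by name: the statement is the Claim_ definition above) =====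
theorem get_coeff_mapping_py_spec : Claim_equal_get_coeff_mapping_py := by
  intro lmax _
  unfold Spec_get_coeff_mapping_py
  rw [alt_eq_bList]
  by_cases h : 0 ≤ lmax + 1
  · unfold get_coeff_mapping_py
    rw [outer_eq (lmax + 1) h]
  · unfold get_coeff_mapping_py bList
    rw [PySem.List.pyRange_one_eq_nil (by omega)]
    simp [PySem.Dict.empty]
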